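-- pv_equiv track=rewrite | github.com/jiwon0719/findingnehair | ai/findingnehair/app/main.py | get_final_diagnosis
-- ===== SOURCE A (Python) =====
-- severity_text_map = {
--     0: "양호",
--     1: "경증",
--     2: "중등도",
--     3: "중증"
-- }
--
-- priority_order = ['follicular_inflammation_pustules', 'excess_sebum', 'follicular_erythema', 'hair_loss', 'dandruff', 'micro_keratin']
--
-- def get_final_diagnosis(diagnosis_result: dict) -> str:
--     max_severity = max(diagnosis_result.values())
--     if max_severity == 0:
--         return "정상"
--
--     candidates = [name for name, val in diagnosis_result.items() if val == max_severity]
--     sorted_candidates = sorted(candidates, key=lambda x: priority_order.index(x) if x in priority_order else 999)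
--     main_symptom = sorted_candidates[0]
--     severity_text = severity_text_map[max_severity]
--     return f"{main_symptom} {severity_text}"
-- ===== SOURCE B (Python) =====
-- severity_text_map = {
--     0: "양호",
--     1: "경증",
--     2: "중등도",
--     3: "중증"
-- }
--
-- priority_order = ['follicular_inflammation_pustules', 'excess_sebum', 'follicular_erythema', 'hair_loss', 'dandruff', 'micro_keratin']
--
-- def get_final_diagnosis(diagnosis_result: dict) -> str:
--     # single pass: first item minimising (-severity, priority rank)
--     best_name, best_val = min(
--         diagnosis_result.items(),
--         key=lambda kv: (-kv[1], priority_order.index(kv[0]) if kv[0] in priority_order else 999))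
--     if best_val == 0:
--         return "정상"
--     return f"{best_name} {severity_text_map[best_val]}"
-- ===== Notes on version B (the rewrite author's own statement) =====
-- stated objective: simpler
-- what changed: Replaced A's three separate scans (max over values, filter of candidates, stable sort by priority index plus head) by a single pass that keeps one running best item under the composite key (-severity, priority rank).
import Mathlib
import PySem

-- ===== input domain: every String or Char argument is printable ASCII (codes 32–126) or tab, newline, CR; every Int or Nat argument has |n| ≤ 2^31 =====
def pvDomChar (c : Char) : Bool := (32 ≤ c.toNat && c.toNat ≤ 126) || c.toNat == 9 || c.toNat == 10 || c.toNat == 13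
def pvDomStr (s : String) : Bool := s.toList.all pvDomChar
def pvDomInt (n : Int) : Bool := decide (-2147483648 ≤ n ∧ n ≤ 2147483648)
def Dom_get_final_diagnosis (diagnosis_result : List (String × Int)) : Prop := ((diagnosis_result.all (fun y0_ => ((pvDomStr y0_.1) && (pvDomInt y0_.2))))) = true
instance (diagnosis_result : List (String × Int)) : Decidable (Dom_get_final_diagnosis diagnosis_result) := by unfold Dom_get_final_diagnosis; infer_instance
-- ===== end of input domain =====

-- B replaces A's three scans (max over values, candidate filter, stable sort by priority rank)
-- by one pass keeping a running best item under the composite key (-severity, priority rank); same result.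

-- ===== PORT A =====
def pvSeverityTextMap : PySem.Dict Int String :=
  PySem.Dict.ofList [(0, "양호"), (1, "경증"), (2, "중등도"), (3, "중증")]

def pvPriorityOrder : List String :=
  ["follicular_inflammation_pustules", "excess_sebum", "follicular_erythema", "hair_loss", "dandruff", "micro_keratin"]

-- 'priority_order.index(x) if x in priority_order else 999' (index? is some exactly when x ∈ priority_order)
def pvPrioKey (x : String) : Int :=
  match PySem.List.index? pvPriorityOrder x with
  | some k => (k : Int)
  | none => 999

def get_final_diagnosis (diagnosis_result : List (String × Int)) : String :=
  match PySem.List.max? (diagnosis_result.map Prod.snd) (fun v => v) with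
  | none => ""   -- max() of an empty dict raises ValueError; excluded by Pre_
  | some max_severity =>
    if max_severity = 0 then "정상"
    else
      let candidates := (diagnosis_result.filter (fun p => decide (p.2 = max_severity))).map Prod.fst
      let sorted_candidates := PySem.List.sorted candidates pvPrioKey
      match sorted_candidates.head? with
      | none => ""   -- unreachable: candidates is nonempty whenever the max exists
      | some main_symptom =>
        match pvSeverityTextMap.get? max_severity with
        | none => ""   -- severity_text_map[max_severity] raises KeyError; excluded by Pre_
        | some severity_text => main_symptom ++ " " ++ severity_text

-- ===== PORT B =====
def get_final_diagnosis_alt (diagnosis_result : List (String × Int)) : String :=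
  match PySem.List.min2? diagnosis_result (fun kv => -kv.2) (fun kv => pvPrioKey kv.1) with
  | none => ""   -- min() of an empty dict raises ValueError; excluded by Pre_
  | some best =>
    if best.2 = 0 then "정상"
    else
      match pvSeverityTextMap.get? best.2 with
      | none => ""   -- severity_text_map[best_val] raises KeyError; excluded by Pre_
      | some t => best.1 ++ " " ++ t

-- ===== PRECONDITION & SPEC =====
-- Pre_ excludes the empty dict (A raises ValueError), severities with a maximum outside 0..3 (A raises
-- KeyError), and association lists with duplicate keys, which do not represent a Python dict.
def Pre_get_final_diagnosis (diagnosis_result : List (String × Int)) : Prop :=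
  diagnosis_result ≠ [] ∧ (diagnosis_result.map Prod.fst).Nodup ∧
    (∀ p ∈ diagnosis_result, p.2 ≤ 3) ∧ (∃ p ∈ diagnosis_result, 0 ≤ p.2)
instance (diagnosis_result : List (String × Int)) : Decidable (Pre_get_final_diagnosis diagnosis_result) := by
  unfold Pre_get_final_diagnosis; infer_instance

def pvWitness_get_final_diagnosis : (List (String × Int)) := ([("dandruff", 2), ("excess_sebum", 2)])

def Spec_get_final_diagnosis (diagnosis_result : List (String × Int)) (out : String) : Prop := out = get_final_diagnosis_alt diagnosis_result
instance (diagnosis_result : List (String × Int)) (out : String) : Decidable (Spec_get_final_diagnosis diagnosis_result out) := by unfold Spec_get_final_diagnosis; infer_instance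

-- ===== CLAIM (what is proved, stated in full; the proofs are below) =====
def Claim_equal_get_final_diagnosis : Prop := ∀ (diagnosis_result : List (String × Int)), Dom_get_final_diagnosis diagnosis_result → Pre_get_final_diagnosis diagnosis_result → Spec_get_final_diagnosis diagnosis_result (get_final_diagnosis diagnosis_result)

-- ===== LEMMAS AND PROOFS =====

-- head of the stable insertion sort, seen one insertion at a time
theorem pv_head?_insertBy {α : Type} (before : α → α → Bool) (x : α) (acc : List α) :
    (PySem.List.insertBy before x acc).head? =
      (match acc.head? with
       | none => some x
       | some m => if before x m then some x else some m) := by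
  cases acc with
  | nil => rfl
  | cons h t =>
    simp only [PySem.List.insertBy, List.head?_cons]
    split_ifs <;> simp_all

theorem pv_head?_foldl_insertBy {α : Type} (before : α → α → Bool) (xs : List α) (acc : List α) :
    (xs.foldl (fun acc x => PySem.List.insertBy before x acc) acc).head? =
      xs.foldl (fun m x =>
        match m with
        | none => some x
        | some m => if before x m then some x else some m) acc.head? := by
  induction xs generalizing acc with
  | nil => rfl
  | cons y ys ih =>
    simp only [List.foldl_cons]
    rw [ih, pv_head?_insertBy]

-- head of PySem's stable sort is the FIRST key-minimal element, i.e. min?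
theorem pv_head?_sorted {α : Type} (xs : List α) (key : α → Int) :
    (PySem.List.sorted xs key).head? = PySem.List.min? xs key := by
  rw [PySem.List.sorted_eq_foldl_insertBy, pv_head?_foldl_insertBy]
  simp only [PySem.List.min?, List.head?_nil]
  congr 1
  funext m x
  cases m <;> simp

-- min? over a mapped list
theorem pv_min?_map {α β : Type} (f : α → β) (key : β → Int) (xs : List α) :
    PySem.List.min? (xs.map f) key = (PySem.List.min? xs (fun a => key (f a))).map f := by
  simp only [PySem.List.min?]
  suffices h : ∀ acc : Option α,
      (xs.map f).foldl (fun acc x => match acc with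
        | none => some x
        | some m => if key x < key m then some x else some m) (acc.map f) =
      (xs.foldl (fun acc a => match acc with
        | none => some a
        | some m => if key (f a) < key (f m) then some a else some m) acc).map f by
    exact h none
  intro acc
  induction xs generalizing acc with
  | nil => rfl
  | cons y ys ih =>
    simp only [List.map_cons, List.foldl_cons]
    rw [← ih]
    congr 1
    cases acc with
    | none => rfl
    | some m => simp only [Option.map_some]; split_ifs <;> rfl

-- the two fold steps, named so that one loop iteration can be rewritten by equations
def pvStep2 {α : Type} (k1 k2 : α → Int) (acc : Option α) (x : α) : Option α :=
  match acc with
  | none => some x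
  | some m => if (decide (k1 x < k1 m) || (!decide (k1 m < k1 x) && decide (k2 x < k2 m))) = true then some x else some m

def pvStepM {α : Type} (k2 : α → Int) (acc : Option α) (x : α) : Option α :=
  match acc with
  | none => some x
  | some m => if k2 x < k2 m then some x else some m

theorem pv_min2?_eq_foldl {α : Type} (xs : List α) (k1 k2 : α → Int) :
    PySem.List.min2? xs k1 k2 = xs.foldl (pvStep2 k1 k2) none := rfl

theorem pv_min?_eq_foldl {α : Type} (xs : List α) (key : α → Int) :
    PySem.List.min? xs key = xs.foldl (pvStepM key) none := rfl

theorem pvStep2_lt {α : Type} (k1 k2 : α → Int) {x m : α} (h : k1 x < k1 m) :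
    pvStep2 k1 k2 (some m) x = some x := by simp [pvStep2, h]

theorem pvStep2_gt {α : Type} (k1 k2 : α → Int) {x m : α} (h : k1 m < k1 x) :
    pvStep2 k1 k2 (some m) x = some m := by
  have h1 : ¬ k1 x < k1 m := by omega
  simp [pvStep2, h1, h]

theorem pvStep2_eq {α : Type} (k1 k2 : α → Int) {x m : α} (h : k1 x = k1 m) :
    pvStep2 k1 k2 (some m) x = if k2 x < k2 m then some x else some m := by
  have h1 : ¬ k1 x < k1 m := by omega
  have h2 : ¬ k1 m < k1 x := by omega
  simp [pvStep2, h1, h2]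

theorem pvStepM_some {α : Type} (k2 : α → Int) (x m : α) :
    pvStepM k2 (some m) x = if k2 x < k2 m then some x else some m := rfl

-- invariant relating the running best of min2? to the running best of min? over the candidates
def pvInv {α : Type} (k1 : α → Int) (K : Int) (a2 aM : Option α) : Prop :=
  (a2 = none ∧ aM = none) ∨ (∃ m, a2 = some m ∧ ((k1 m = K ∧ aM = some m) ∨ (K < k1 m ∧ aM = none)))

theorem pv_min2?_aux {α : Type} (k1 k2 : α → Int) (K : Int) (xs : List α) :
    (∀ q ∈ xs, K ≤ k1 q) → ∀ (a2 aM : Option α), pvInv k1 K a2 aM →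
    pvInv k1 K (xs.foldl (pvStep2 k1 k2) a2) ((xs.filter (fun q => decide (k1 q = K))).foldl (pvStepM k2) aM)
    ∧ (((∃ q ∈ xs, k1 q = K) ∨ (∃ m, a2 = some m ∧ k1 m = K)) →
        ∃ m, xs.foldl (pvStep2 k1 k2) a2 = some m ∧ k1 m = K) := by
  induction xs with
  | nil =>
    intro _ a2 aM hinv
    refine ⟨hinv, ?_⟩
    rintro (⟨q, hq, _⟩ | ⟨m, hm, hk⟩)
    · exact absurd hq List.not_mem_nil
    · exact ⟨m, hm, hk⟩
  | cons x xs ih =>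
    intro hmin a2 aM hinv
    have hxK : K ≤ k1 x := hmin x List.mem_cons_self
    have hmin' : ∀ q ∈ xs, K ≤ k1 q := fun q hq => hmin q (List.mem_cons_of_mem _ hq)
    rw [List.foldl_cons, List.filter_cons]
    by_cases hc : k1 x = K
    · -- x is a candidate (k1 x = K)
      rw [decide_eq_true hc, if_pos rfl, List.foldl_cons]
      rcases hinv with ⟨h2, hM⟩ | ⟨m, h2, ⟨hmK, hM⟩ | ⟨hmK, hM⟩⟩
      · subst h2; subst hM
        refine ⟨(ih hmin' (some x) (some x) (Or.inr ⟨x, rfl, Or.inl ⟨hc, rfl⟩⟩)).1, fun _ =>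
          (ih hmin' (some x) (some x) (Or.inr ⟨x, rfl, Or.inl ⟨hc, rfl⟩⟩)).2 (Or.inr ⟨x, rfl, hc⟩)⟩
      · subst h2; subst hM
        rw [pvStep2_eq k1 k2 (by omega), pvStepM_some]
        by_cases h2lt : k2 x < k2 m
        · rw [if_pos h2lt]
          refine ⟨(ih hmin' (some x) (some x) (Or.inr ⟨x, rfl, Or.inl ⟨hc, rfl⟩⟩)).1, fun _ =>
            (ih hmin' (some x) (some x) (Or.inr ⟨x, rfl, Or.inl ⟨hc, rfl⟩⟩)).2 (Or.inr ⟨x, rfl, hc⟩)⟩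
        · rw [if_neg h2lt]
          refine ⟨(ih hmin' (some m) (some m) (Or.inr ⟨m, rfl, Or.inl ⟨hmK, rfl⟩⟩)).1, fun _ =>
            (ih hmin' (some m) (some m) (Or.inr ⟨m, rfl, Or.inl ⟨hmK, rfl⟩⟩)).2 (Or.inr ⟨m, rfl, hmK⟩)⟩
      · subst h2; subst hM
        rw [pvStep2_lt k1 k2 (by omega)]
        refine ⟨(ih hmin' (some x) (some x) (Or.inr ⟨x, rfl, Or.inl ⟨hc, rfl⟩⟩)).1, fun _ =>
          (ih hmin' (some x) (some x) (Or.inr ⟨x, rfl, Or.inl ⟨hc, rfl⟩⟩)).2 (Or.inr ⟨x, rfl, hc⟩)⟩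
    · -- x is not a candidate: K < k1 x
      have hxgt : K < k1 x := lt_of_le_of_ne hxK (fun h => hc h.symm)
      rw [decide_eq_false hc, if_neg Bool.false_ne_true]
      rcases hinv with ⟨h2, hM⟩ | ⟨m, h2, ⟨hmK, hM⟩ | ⟨hmK, hM⟩⟩
      · subst h2; subst hM
        refine ⟨(ih hmin' (some x) none (Or.inr ⟨x, rfl, Or.inr ⟨hxgt, rfl⟩⟩)).1, ?_⟩
        rintro (⟨q, hq, hqK⟩ | ⟨m', hm', _⟩)
        · rcases List.mem_cons.mp hq with rfl | hq'
          · exact absurd hqK hc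
          · exact (ih hmin' (some x) none (Or.inr ⟨x, rfl, Or.inr ⟨hxgt, rfl⟩⟩)).2 (Or.inl ⟨q, hq', hqK⟩)
        · cases hm'
      · subst h2; subst hM
        rw [pvStep2_gt k1 k2 (by omega)]
        refine ⟨(ih hmin' (some m) (some m) (Or.inr ⟨m, rfl, Or.inl ⟨hmK, rfl⟩⟩)).1, fun _ =>
          (ih hmin' (some m) (some m) (Or.inr ⟨m, rfl, Or.inl ⟨hmK, rfl⟩⟩)).2 (Or.inr ⟨m, rfl, hmK⟩)⟩
      · subst h2; subst hM
        have hnext : ∃ m', pvStep2 k1 k2 (some m) x = some m' ∧ K < k1 m' := by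
          rcases lt_trichotomy (k1 x) (k1 m) with h | h | h
          · exact ⟨x, pvStep2_lt k1 k2 h, hxgt⟩
          · rw [pvStep2_eq k1 k2 h]
            split_ifs
            · exact ⟨x, rfl, hxgt⟩
            · exact ⟨m, rfl, hmK⟩
          · exact ⟨m, pvStep2_gt k1 k2 h, hmK⟩
        obtain ⟨m', hm', hm'gt⟩ := hnext
        rw [hm']
        refine ⟨(ih hmin' (some m') none (Or.inr ⟨m', rfl, Or.inr ⟨hm'gt, rfl⟩⟩)).1, ?_⟩
        rintro (⟨q, hq, hqK⟩ | ⟨m'', hm'', hm''K⟩)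
        · rcases List.mem_cons.mp hq with rfl | hq'
          · exact absurd hqK hc
          · exact (ih hmin' (some m') none (Or.inr ⟨m', rfl, Or.inr ⟨hm'gt, rfl⟩⟩)).2 (Or.inl ⟨q, hq', hqK⟩)
        · injection hm'' with h; subst h; omega

-- assembling the A-side pipeline: its max, candidates and sorted head, against B's single fold
theorem pv_assemble (xs : List (String × Int)) (hne : xs ≠ []) :
    get_final_diagnosis xs = get_final_diagnosis_alt xs := by
  unfold get_final_diagnosis get_final_diagnosis_alt
  cases hmax : PySem.List.max? (xs.map Prod.snd) (fun v => v) with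
  | none => exact absurd (List.map_eq_nil_iff.mp ((PySem.List.max?_eq_none_iff _ _).mp hmax)) hne
  | some m0 =>
    obtain ⟨p, hp, hp2⟩ := List.mem_map.mp (PySem.List.max?_mem hmax)
    have hub : ∀ q ∈ xs, q.2 ≤ m0 := by
      intro q hq
      simpa using PySem.List.max?_isMax hmax q.2 (List.mem_map_of_mem hq)
    have hKmin : ∀ q ∈ xs, -m0 ≤ (fun kv : String × Int => -kv.2) q := by
      intro q hq
      have := hub q hq
      simp only []
      omega
    obtain ⟨hinv, hexm⟩ := pv_min2?_aux (fun kv : String × Int => -kv.2)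
      (fun kv : String × Int => pvPrioKey kv.1) (-m0) xs hKmin none none (Or.inl ⟨rfl, rfl⟩)
    obtain ⟨b, hb, hbK⟩ := hexm (Or.inl ⟨p, hp, by simp [hp2]⟩)
    have hb2 : b.2 = m0 := by simpa using hbK
    have hM : (xs.filter (fun q => decide ((fun kv : String × Int => -kv.2) q = -m0))).foldl
        (pvStepM (fun kv : String × Int => pvPrioKey kv.1)) none = some b := by
      rcases hinv with ⟨h2, _⟩ | ⟨m, h2, ⟨hmK, hM⟩ | ⟨hmK, hM⟩⟩
      · rw [hb] at h2; cases h2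
      · rw [hb] at h2; injection h2 with h; subst h; exact hM
      · rw [hb] at h2; injection h2 with h; subst h
        have hbK' : -b.2 = -m0 := hbK
        have hmK' : -m0 < -b.2 := hmK
        omega
    have hmin2 : PySem.List.min2? xs (fun kv => -kv.2) (fun kv => pvPrioKey kv.1) = some b := by
      rw [pv_min2?_eq_foldl]; exact hb
    have hfilter : xs.filter (fun q => decide ((fun kv : String × Int => -kv.2) q = -m0))
        = xs.filter (fun p => decide (p.2 = m0)) := by
      apply List.filter_congr
      intro q _
      simp only [decide_eq_decide]
      omega
    have hminC : PySem.List.min? ((xs.filter (fun p => decide (p.2 = m0))).map Prod.fst) pvPrioKey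
        = some b.1 := by
      rw [pv_min?_map, pv_min?_eq_foldl, ← hfilter, hM]
      rfl
    simp only [hmin2]
    rw [← hb2] at hminC ⊢
    by_cases h0 : b.2 = 0
    · simp [h0]
    · rw [if_neg h0, if_neg h0]
      simp only [pv_head?_sorted, hminC]

-- ===== VERDICT (by name: the statement is the Claim_ definition above) =====
theorem get_final_diagnosis_spec : Claim_equal_get_final_diagnosis := by
  intro xs _hdom hpre
  unfold Spec_get_final_diagnosis
  exact pv_assemble xs hpre.1
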